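-- pv_equiv track=rewrite | github.com/HanSeongDeok/before-dinner-algorithm | han_project/Level 2/21. n^2 배열.py | solution
-- ===== SOURCE A (Python) =====
-- def solution(n, left, right):
--     answer = []
--     tmp = [i for i in range(1, n+1)]
--     for i in range(n):
--         for j in range(i):
--             tmp[j] = i+1
--         answer.append(tmp[:])
--
--     arr_answer = []
--     for i in range(left, right+1):
--         point = answer[int(i // n)][int(i % n)]
--         arr_answer.append(point)
--     return arr_answer
-- ===== SOURCE B (Python) =====
-- def solution(n, left, right):
--     return [max(i // n, i % n) + 1 for i in range(left, right + 1)]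
-- ===== Notes on version B (the rewrite author's own statement) =====
-- stated objective: faster
-- what changed: B replaces A's O(n^2) construction of the full n x n max-table (with an inner mutation loop per row) by the closed form max(i//n, i%n)+1 computed directly for each sliced index, in one pass over [left, right].
-- outside the precondition, e.g. on solution(3, -3, -3): A returns [3], B returns [1]
import Mathlib
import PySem

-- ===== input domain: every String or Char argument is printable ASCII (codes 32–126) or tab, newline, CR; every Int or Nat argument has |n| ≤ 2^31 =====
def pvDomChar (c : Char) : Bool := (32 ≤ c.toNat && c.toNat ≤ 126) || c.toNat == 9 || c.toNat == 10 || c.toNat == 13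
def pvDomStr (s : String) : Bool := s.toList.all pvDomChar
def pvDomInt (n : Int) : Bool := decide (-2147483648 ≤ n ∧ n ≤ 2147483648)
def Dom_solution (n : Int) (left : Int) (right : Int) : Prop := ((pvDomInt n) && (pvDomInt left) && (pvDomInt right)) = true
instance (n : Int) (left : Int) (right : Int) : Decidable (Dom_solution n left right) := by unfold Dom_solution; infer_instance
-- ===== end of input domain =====

-- B computes each sliced element by the closed form max(i//n, i%n)+1 instead of building A's n x n table (faster, asymptotic).

-- ===== PORT A =====
def solution (n : Int) (left : Int) (right : Int) : List Int :=
  -- answer = []; tmp = [i for i in range(1, n+1)]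
  let tmp0 : List Int := (PySem.List.pyRange 1 (n+1) 1).map (fun i => i)
  -- for i in range(n): for j in range(i): tmp[j] = i+1; answer.append(tmp[:])
  let st := (PySem.List.pyRange 0 n 1).foldl
      (fun (st : List (List Int) × List Int) i =>
        let tmp := (PySem.List.pyRange 0 i 1).foldl
          (fun t j => PySem.List.pySetD t j (i+1)) st.2
        (st.1 ++ [tmp], tmp))
      (([] : List (List Int)), tmp0)
  -- arr_answer loop (pyGetD is exact under Pre_, which keeps both indices in range)
  (PySem.List.pyRange left (right+1) 1).foldl
    (fun acc i =>
      acc ++ [PySem.List.pyGetD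
                (PySem.List.pyGetD st.1 (PySem.Int.floordiv i n) [])
                (PySem.Int.mod i n) 0]) []

-- ===== PORT B =====
def solution_alt (n : Int) (left : Int) (right : Int) : List Int :=
  (PySem.List.pyRange left (right+1) 1).map
    (fun i => max (PySem.Int.floordiv i n) (PySem.Int.mod i n) + 1)

-- ===== PRECONDITION & SPEC =====
-- Pre_ keeps the natural domain of the task (1 ≤ n, 0 ≤ left, right < n*n) plus the empty slice
-- left > right (both return []). It excludes negative slice positions with left ≤ right, where A's
-- value comes from Python's accidental negative-index wraparound into the row list (A raises
-- IndexError on every other excluded input).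
def Pre_solution (n : Int) (left : Int) (right : Int) : Prop :=
  right < left ∨ (1 ≤ n ∧ 0 ≤ left ∧ right < n*n)
instance (n : Int) (left : Int) (right : Int) : Decidable (Pre_solution n left right) := by
  unfold Pre_solution; infer_instance
def pvWitness_solution : Int × Int × Int := (3, 2, 5)

def Spec_solution (n : Int) (left : Int) (right : Int) (out : List Int) : Prop :=
  out = solution_alt n left right
instance (n : Int) (left : Int) (right : Int) (out : List Int) : Decidable (Spec_solution n left right out) := by
  unfold Spec_solution; infer_instance

-- ===== CLAIM (what is proved, stated in full; the proofs are below) =====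
def Claim_equal_solution : Prop := ∀ (n : Int) (left : Int) (right : Int), Dom_solution n left right → Pre_solution n left right → Spec_solution n left right (solution n left right)

-- ===== LEMMAS AND PROOFS =====

-- row r of A's table: [max r c + 1 for c in range(n)]
def pvRow (n r : Int) : List Int := (PySem.List.pyRange 0 n 1).map (fun c => max r c + 1)

-- tmp's initial value is row (-1)
theorem pvTmp0 (n : Int) :
    (PySem.List.pyRange 1 (n+1) 1).map (fun i => i) = pvRow n (-1) := by
  unfold pvRow
  rw [PySem.List.pyRange_one 1 (n+1), PySem.List.pyRange_one 0 n]
  simp [List.map_map]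
  intro k _
  omega

-- setting index k of a mapped range
theorem pvSetRow (f : Int → Int) (b : Int) (k : Nat) (_hk : (k:Int) < b) (v : Int) :
    PySem.List.pySetD ((PySem.List.pyRange 0 b 1).map f) ((k:Int)) v
      = (PySem.List.pyRange 0 b 1).map (fun c => if c = (k:Int) then v else f c) := by
  rw [PySem.List.pySetD_natCast]
  apply List.ext_getElem
  · simp
  · intro j h1 h2
    simp only [List.getElem_set, List.getElem_map, PySem.List.getElem_pyRange_one] at *
    split_ifs <;> first | rfl | omega

-- the inner loop, truncated at k steps
theorem pvInnerAux (n i : Int) (_hi0 : 0 ≤ i) (hin : i ≤ n) :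
    ∀ (k : Nat), (k:Int) ≤ i →
    (PySem.List.pyRange 0 (k:Int) 1).foldl
        (fun t j => PySem.List.pySetD t j (i+1)) (pvRow n (i-1))
      = (PySem.List.pyRange 0 n 1).map
          (fun c => if c < (k:Int) then i+1 else max (i-1) c + 1) := by
  intro k
  induction k with
  | zero =>
    intro _
    rw [PySem.List.pyRange_one_eq_nil (by omega)]
    unfold pvRow
    simp only [List.foldl_nil]
    apply List.map_congr_left
    intro c hc
    rw [PySem.List.mem_pyRange_one] at hc
    rw [if_neg (by omega)]
  | succ k ih =>
    intro hk1
    have hcast : ((k+1 : Nat) : Int) = (k:Int) + 1 := by push_cast; ring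
    rw [hcast, PySem.List.pyRange_one_succ_right (by omega), List.foldl_append,
        ih (by omega)]
    simp only [List.foldl_cons, List.foldl_nil]
    rw [pvSetRow _ n k (by omega) (i+1)]
    apply List.map_congr_left
    intro c hc
    rw [PySem.List.mem_pyRange_one] at hc
    by_cases h1 : c = (k:Int)
    · rw [if_pos h1, if_pos (by omega)]
    · rw [if_neg h1]
      by_cases h2 : c < (k:Int)
      · rw [if_pos h2, if_pos (by omega)]
      · rw [if_neg h2, if_neg (by omega)]

-- the full inner loop turns row (i-1) into row i
theorem pvInner (n i : Int) (_hi0 : 0 ≤ i) (hin : i ≤ n) :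
    (PySem.List.pyRange 0 i 1).foldl
        (fun t j => PySem.List.pySetD t j (i+1)) (pvRow n (i-1))
      = pvRow n i := by
  have h : ((i.toNat : Nat) : Int) = i := by omega
  have := pvInnerAux n i _hi0 hin i.toNat (by omega)
  rw [h] at this
  rw [this]
  unfold pvRow
  apply List.map_congr_left
  intro c hc
  rw [PySem.List.mem_pyRange_one] at hc
  by_cases h2 : c < i
  · rw [if_pos h2]; omega
  · rw [if_neg h2]; omega

-- the outer loop builds the rows 0..m-1 and leaves tmp = row (m-1)
theorem pvOuter (n : Int) : ∀ (m : Nat), (m:Int) ≤ n →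
    (PySem.List.pyRange 0 (m:Int) 1).foldl
        (fun (st : List (List Int) × List Int) i =>
          let tmp := (PySem.List.pyRange 0 i 1).foldl
            (fun t j => PySem.List.pySetD t j (i+1)) st.2
          (st.1 ++ [tmp], tmp))
        (([] : List (List Int)), pvRow n (-1))
      = ((PySem.List.pyRange 0 (m:Int) 1).map (pvRow n), pvRow n ((m:Int)-1)) := by
  intro m
  induction m with
  | zero =>
    intro _
    rw [PySem.List.pyRange_one_eq_nil (by omega)]
    norm_num
  | succ m ih =>
    intro hm
    have hcast : ((m+1 : Nat) : Int) = (m:Int) + 1 := by push_cast; ring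
    rw [hcast, PySem.List.pyRange_one_succ_right (by omega), List.foldl_append,
        ih (by omega)]
    simp only [List.foldl_cons, List.foldl_nil, List.map_append, List.map_cons,
      List.map_nil]
    rw [pvInner n (m:Int) (by omega) (by omega)]
    have h1 : (m:Int) + 1 - 1 = (m:Int) := by ring
    rw [h1]

-- ===== VERDICT (by name: the statement is the Claim_ definition above) =====
theorem solution_spec : Claim_equal_solution := by
  intro n left right _ hpre
  unfold Spec_solution solution solution_alt
  rcases hpre with hlt | ⟨hn, hl, hr⟩
  · rw [show PySem.List.pyRange left (right+1) 1 = [] from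
        PySem.List.pyRange_one_eq_nil (by omega)]
    simp
  · rw [pvTmp0 n]
    have hn0 : ((n.toNat : Nat) : Int) = n := by omega
    have houter := pvOuter n n.toNat (by omega)
    rw [hn0] at houter
    simp only [houter, PySem.List.foldl_append_singleton_eq_map, List.nil_append]
    apply List.map_congr_left
    intro i hi
    rw [PySem.List.mem_pyRange_one] at hi
    have hi0 : 0 ≤ i := by omega
    have hi2 : i < n*n := by omega
    have hq0 : 0 ≤ PySem.Int.floordiv i n := by
      rw [PySem.Int.le_floordiv_iff_mul_le (by omega)]; omega
    have hqn : PySem.Int.floordiv i n < n := by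
      rw [PySem.Int.floordiv_lt_iff_lt_mul (by omega)]; omega
    have hr0 : 0 ≤ PySem.Int.mod i n := by
      rw [PySem.Int.mod_eq_emod_of_pos (by omega)]
      exact Int.emod_nonneg i (by omega)
    have hrn : PySem.Int.mod i n < n := by
      rw [PySem.Int.mod_eq_emod_of_pos (by omega)]
      exact Int.emod_lt_of_pos i (by omega)
    rw [PySem.List.pyGetD_map_pyRange_of_nonneg (pvRow n) n _ [] hq0 hqn]
    unfold pvRow
    rw [PySem.List.pyGetD_map_pyRange_of_nonneg _ n _ 0 hr0 hrn]
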